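-- pv_equiv track=rewrite | github.com/JackGerashirly/Cryptotool | Stream_Cipher/Stream_Cipher.py | lfsr
-- ===== SOURCE A (Python) =====
-- def lfsr(iv, taps, length):
--     """
--     Implement of a simple LFSR
--
--     :param iv: initial Value, put in a direction: [v_{m-1}, v_{m-2}, ..., v_{0}] (in reverse order to the pic) -> list
--     :param taps: LFSR configuration(p sequence), also put in a direction: [p_{m-1}, p_{m-1}, ..., p_{0}] -> list
--     :param length: the length of the plaintext , cipher or the length you actually want -> int
--     :return: the key in stream cipher -> bits list
--     """
--     # Get the index of taps
--     index = []
--     for i in range(len(taps)):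
--         if taps[i]:
--             index.append(i)
--
--     state = iv.copy()
--     key = []
--     left_length = length
--     while left_length > 0:
--         feedback = 0
--         # store the last one
--         key.append(state[-1])
--         # feedback
--         for i in index:
--             feedback ^= state[i]
--         # shift
--         state = [feedback] + state[:-1]
--         # count length
--         left_length -= 1
--     return key
-- ===== SOURCE B (Python) =====
-- def lfsr(iv, taps, length):
--     """Same keystream via the output-sequence recurrence: out[j] = XOR of out[j-1-i]
--     over tap positions i once j >= len(iv); no per-bit list copy/shift."""
--     m = len(iv)
--     taps_idx = [i for i, t in enumerate(taps) if t]
--     out = []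
--     for j in range(length):
--         if j < m:
--             out.append(iv[m - 1 - j])
--         else:
--             v = 0
--             for i in taps_idx:
--                 v ^= out[j - 1 - i]
--             out.append(v)
--     return out
-- ===== Notes on version B (the rewrite author's own statement) =====
-- stated objective: faster
-- what changed: B replaces A's per-bit state-list rebuild ([feedback]+state[:-1] each step) by the linear recurrence on the output stream itself: out[j] = iv[m-1-j] for j<m and out[j] = XOR of out[j-1-i] over tap positions i for j>=m, so each bit costs O(t) instead of O(m).
import Mathlib
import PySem

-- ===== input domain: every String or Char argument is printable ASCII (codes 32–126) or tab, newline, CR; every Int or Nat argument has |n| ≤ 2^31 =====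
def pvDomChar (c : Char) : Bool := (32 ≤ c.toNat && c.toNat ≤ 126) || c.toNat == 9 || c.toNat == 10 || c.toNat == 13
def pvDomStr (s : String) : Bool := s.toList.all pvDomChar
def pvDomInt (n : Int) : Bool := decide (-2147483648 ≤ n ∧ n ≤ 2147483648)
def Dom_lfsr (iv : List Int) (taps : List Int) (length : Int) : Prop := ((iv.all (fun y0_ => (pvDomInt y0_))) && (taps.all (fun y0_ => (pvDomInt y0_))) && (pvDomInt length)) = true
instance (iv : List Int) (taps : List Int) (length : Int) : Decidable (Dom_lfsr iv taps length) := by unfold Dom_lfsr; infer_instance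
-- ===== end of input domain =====

-- B generates the keystream by the output-stream recurrence (O(t) per bit) instead of
-- A's per-bit list rebuild (O(m) per bit); objective: faster.

-- ===== PORT A =====
def lfsrIndex (taps : List Int) : List Int :=
  (PySem.List.pyRange 0 taps.length 1).foldl
    (fun index i => if PySem.List.pyGetD taps i 0 ≠ 0 then index ++ [i] else index) []

def lfsrLoop (index : List Int) (state : List Int) (key : List Int) : Nat → List Int
  | 0 => key
  | n + 1 =>
    let key' := key ++ [PySem.List.pyGetD state (-1) 0]
    let feedback := index.foldl (fun fb i => PySem.Int.bxor fb (PySem.List.pyGetD state i 0)) 0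
    lfsrLoop index (feedback :: PySem.List.slice state none (some (-1))) key' n

def lfsr (iv : List Int) (taps : List Int) (length : Int) : List Int :=
  lfsrLoop (lfsrIndex taps) iv [] length.toNat

-- ===== PORT B =====
def lfsr_alt (iv : List Int) (taps : List Int) (length : Int) : List Int :=
  let m : Int := iv.length
  let tapsIdx : List Int := ((PySem.List.enumerate taps).filter (fun p => p.2 ≠ 0)).map (fun p => p.1)
  (PySem.List.pyRange 0 length 1).foldl
    (fun out j =>
      if j < m then out ++ [PySem.List.pyGetD iv (m - 1 - j) 0]
      else out ++ [tapsIdx.foldl (fun v i => PySem.Int.bxor v (PySem.List.pyGetD out (j - 1 - i) 0)) 0])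
    []

-- ===== PRECONDITION & SPEC =====
-- Pre_ excludes exactly the inputs on which A raises IndexError: length > 0 with an
-- empty iv (state[-1]), or a set tap whose position is outside the state (state[i]).
def Pre_lfsr (iv : List Int) (taps : List Int) (length : Int) : Prop :=
  length ≤ 0 ∨ (iv ≠ [] ∧ ∀ k < taps.length, taps.getD k 0 ≠ 0 → k < iv.length)
instance (iv : List Int) (taps : List Int) (length : Int) : Decidable (Pre_lfsr iv taps length) := by unfold Pre_lfsr; infer_instance

def pvWitness_lfsr : List Int × List Int × Int := ([1, 0, 1], [0, 1, 1], 5)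

def Spec_lfsr (iv : List Int) (taps : List Int) (length : Int) (out : List Int) : Prop := out = lfsr_alt iv taps length
instance (iv : List Int) (taps : List Int) (length : Int) (out : List Int) : Decidable (Spec_lfsr iv taps length out) := by unfold Spec_lfsr; infer_instance

-- ===== CLAIM (what is proved, stated in full; the proofs are below) =====
def Claim_equal_lfsr : Prop := ∀ (iv : List Int) (taps : List Int) (length : Int), Dom_lfsr iv taps length → Pre_lfsr iv taps length → Spec_lfsr iv taps length (lfsr iv taps length)

-- ===== LEMMAS AND PROOFS =====

def idxc (taps : List Int) : List Int :=
  ((List.range taps.length).filter (fun k => taps.getD k 0 ≠ 0)).map (fun k => (k : Int))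

theorem index_A (taps : List Int) : lfsrIndex taps = idxc taps := by
  unfold lfsrIndex
  rw [PySem.List.pyRange_one, List.foldl_map]
  rw [PySem.List.foldl_append_ite (p := fun k : Nat => PySem.List.pyGetD taps (0 + (k:Int)) 0 ≠ 0)
      (f := fun k : Nat => 0 + (k:Int))]
  simp [idxc, List.map_eq_flatMap]

theorem index_B (taps : List Int) :
    ((PySem.List.enumerate taps).filter (fun p => p.2 ≠ 0)).map (fun p => p.1) = idxc taps := by
  rw [PySem.List.enumerate_eq_map_pyRange (d := 0), PySem.List.pyRange_one]
  simp only [List.map_map, List.filter_map, List.map_map]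
  simp [idxc, Function.comp_def, List.map_eq_flatMap]

theorem mem_idxc (taps : List Int) (i : Int) :
    i ∈ idxc taps ↔ ∃ k : Nat, k < taps.length ∧ taps.getD k 0 ≠ 0 ∧ (k : Int) = i := by
  simp [idxc, List.mem_filter]
  constructor
  · rintro ⟨a, ⟨h1, h2⟩, h3⟩; exact ⟨a, h1, h2, h3.symm⟩
  · rintro ⟨a, h1, h2, h3⟩; exact ⟨a, ⟨h1, h2⟩, h3.symm⟩

def sVal (iv : List Int) (idx : List Int) (j : Nat) : Int :=
  if j < iv.length then iv.getD (iv.length - 1 - j) 0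
  else if h : j = 0 then 0
  else idx.foldl (fun v i => PySem.Int.bxor v (sVal iv idx (j - 1 - i.toNat))) 0
termination_by j
decreasing_by omega

theorem sVal_lt (iv idx : List Int) (j : Nat) (hj : j < iv.length) :
    sVal iv idx j = iv.getD (iv.length - 1 - j) 0 := by
  rw [sVal]; simp [hj]

theorem sVal_ge (iv idx : List Int) (j : Nat) (hj : iv.length ≤ j) (hm : iv ≠ []) :
    sVal iv idx j = idx.foldl (fun v i => PySem.Int.bxor v (sVal iv idx (j - 1 - i.toNat))) 0 := by
  have h0 : j ≠ 0 := by have := List.length_pos_iff.mpr hm; omega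
  rw [sVal]
  simp [Nat.not_lt.mpr hj, h0]

theorem Bfold (iv taps : List Int) (hm : iv ≠ [])
    (ht : ∀ k < taps.length, taps.getD k 0 ≠ 0 → k < iv.length) (n : Nat) :
    (List.range n).foldl
      (fun out (k : Nat) =>
        if (k : Int) < (iv.length : Int) then
          out ++ [PySem.List.pyGetD iv ((iv.length : Int) - 1 - (k : Int)) 0]
        else
          out ++ [(idxc taps).foldl
            (fun v i => PySem.Int.bxor v (PySem.List.pyGetD out ((k : Int) - 1 - i) 0)) 0]) []
    = (List.range n).map (sVal iv (idxc taps)) := by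
  induction n with
  | zero => rfl
  | succ n ih =>
    rw [List.range_succ, List.foldl_append, List.map_append, ih]
    simp only [List.foldl_cons, List.foldl_nil]
    by_cases hk : n < iv.length
    · have hki : (n : Int) < (iv.length : Int) := by exact_mod_cast hk
      have harith : (iv.length : Int) - 1 - (n : Int) = ((iv.length - 1 - n : Nat) : Int) := by omega
      rw [if_pos hki, harith, PySem.List.pyGetD_natCast, ← sVal_lt iv (idxc taps) n hk]
      simp
    · have hki : ¬ (n : Int) < (iv.length : Int) := by exact_mod_cast hk
      rw [if_neg hki]
      have hn1 : 1 ≤ iv.length := by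
        have := List.length_pos_iff.mpr hm; omega
      have hfold : (idxc taps).foldl
          (fun v i => PySem.Int.bxor v
            (PySem.List.pyGetD ((List.range n).map (sVal iv (idxc taps))) ((n : Int) - 1 - i) 0)) 0
          = (idxc taps).foldl
          (fun v i => PySem.Int.bxor v (sVal iv (idxc taps) (n - 1 - i.toNat))) 0 := by
        apply PySem.List.foldl_congr_mem
        intro acc i hi
        rcases (mem_idxc taps i).mp hi with ⟨k0, hk0, htap, rfl⟩
        have hk0m : k0 < iv.length := ht k0 hk0 htap
        have hlt : n - 1 - k0 < n := by omega
        have harith : (n : Int) - 1 - (k0 : Int) = ((n - 1 - k0 : Nat) : Int) := by omega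
        rw [harith, PySem.List.pyGetD_natCast]
        have : ((List.range n).map (sVal iv (idxc taps))).getD (n - 1 - k0) 0
            = sVal iv (idxc taps) (n - 1 - k0) := by
          rw [List.getD_eq_getElem _ _ (by simpa using hlt)]
          simp
        rw [this, Int.toNat_natCast]
      rw [hfold, ← sVal_ge iv (idxc taps) n (by omega) hm]
      simp

theorem Aloop (iv taps : List Int) (hm : iv ≠ [])
    (ht : ∀ k < taps.length, taps.getD k 0 ≠ 0 → k < iv.length) (fuel : Nat) :
    ∀ n : Nat,
      lfsrLoop (idxc taps)
        ((List.range iv.length).map (fun k => sVal iv (idxc taps) (n + iv.length - 1 - k)))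
        ((List.range n).map (sVal iv (idxc taps))) fuel
      = (List.range (n + fuel)).map (sVal iv (idxc taps)) := by
  have hm1 : 1 ≤ iv.length := by have := List.length_pos_iff.mpr hm; omega
  induction fuel with
  | zero => intro n; simp [lfsrLoop]
  | succ f ih =>
    intro n
    set s := sVal iv (idxc taps) with hs
    set state := (List.range iv.length).map (fun k => s (n + iv.length - 1 - k)) with hstate
    have hslen : state.length = iv.length := by simp [hstate]
    have hsne : state ≠ [] := by
      intro h; rw [h] at hslen; simp at hslen; omega
    -- the appended output bit
    have hlast : PySem.List.pyGetD state (-1) 0 = s n := by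
      rw [PySem.List.pyGetD_neg_one state 0 hsne, List.getLast_eq_getElem]
      simp [hstate]
      congr 1
      omega
    -- feedback = s (n + m)
    have hfb : (idxc taps).foldl (fun fb i => PySem.Int.bxor fb (PySem.List.pyGetD state i 0)) 0
        = s (n + iv.length) := by
      rw [hs, sVal_ge iv (idxc taps) (n + iv.length) (by omega) hm]
      apply PySem.List.foldl_congr_mem
      intro acc i hi
      rcases (mem_idxc taps i).mp hi with ⟨k0, hk0, htap, rfl⟩
      have hk0m : k0 < iv.length := ht k0 hk0 htap
      rw [PySem.List.pyGetD_natCast]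
      have : state.getD k0 0 = s (n + iv.length - 1 - k0) := by
        rw [List.getD_eq_getElem _ _ (by omega)]
        simp [hstate]
      rw [this, Int.toNat_natCast]
    -- the shifted state
    have hshift : s (n + iv.length) :: PySem.List.slice state none (some (-1))
        = (List.range iv.length).map (fun k => s (n + 1 + iv.length - 1 - k)) := by
      rw [PySem.List.slice_to_neg_one]
      have hm' : iv.length = (iv.length - 1) + 1 := by omega
      have hdl : state.dropLast
          = List.map (fun k => s (n + iv.length - 1 - k)) (List.range (iv.length - 1)) := by
        rw [hstate]
        conv_lhs => rw [hm', List.range_succ, List.map_append]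
        simp only [List.map_cons, List.map_nil, List.dropLast_concat]
        apply List.map_congr_left
        intro a _
        congr 1
        omega
      rw [hdl]
      apply List.ext_getElem
      · simp; omega
      · intro i h1 h2
        match i with
        | 0 =>
          simp only [List.getElem_cons_zero, List.getElem_map, List.getElem_range]
          congr 1
          omega
        | (i + 1) =>
          simp only [List.getElem_cons_succ, List.getElem_map, List.getElem_range]
          congr 1
          omega
    rw [show n + (f + 1) = (n + 1) + f by omega]
    have := ih (n + 1)
    rw [← this]
    simp only [lfsrLoop]
    rw [hlast, hfb, hshift]
    congr 1
    rw [List.range_succ]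
    simp

theorem iv_eq_map (iv taps : List Int) (hm : iv ≠ []) :
    iv = (List.range iv.length).map (fun k => sVal iv (idxc taps) (0 + iv.length - 1 - k)) := by
  apply List.ext_getElem
  · simp
  · intro i h1 h2
    simp only [List.getElem_map, List.getElem_range]
    have h3 : 0 + iv.length - 1 - i < iv.length := by omega
    rw [sVal_lt _ _ _ h3, List.getD_eq_getElem _ _ (by omega)]
    congr 1
    omega

theorem A_eq_map (iv taps : List Int) (hm : iv ≠ [])
    (ht : ∀ k < taps.length, taps.getD k 0 ≠ 0 → k < iv.length) (length : Int) :
    lfsr iv taps length = (List.range length.toNat).map (sVal iv (idxc taps)) := by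
  unfold lfsr
  rw [index_A]
  conv_lhs => rw [iv_eq_map iv taps hm]
  have := Aloop iv taps hm ht length.toNat 0
  simpa using this

theorem B_eq_map (iv taps : List Int) (hm : iv ≠ [])
    (ht : ∀ k < taps.length, taps.getD k 0 ≠ 0 → k < iv.length) (length : Int) :
    lfsr_alt iv taps length = (List.range length.toNat).map (sVal iv (idxc taps)) := by
  unfold lfsr_alt
  simp only [index_B]
  rw [PySem.List.pyRange_one, List.foldl_map]
  simp only [Int.sub_zero, zero_add]
  exact Bfold iv taps hm ht length.toNat

-- ===== VERDICT (by name: the statement is the Claim_ definition above) =====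
theorem lfsr_spec : Claim_equal_lfsr := by
  intro iv taps length _ hpre
  unfold Spec_lfsr
  rcases hpre with hle | ⟨hm, ht⟩
  · have h0 : length.toNat = 0 := by omega
    unfold lfsr lfsr_alt
    rw [h0]
    have : PySem.List.pyRange 0 length 1 = [] := by
      rw [PySem.List.pyRange_one]
      simp
      omega
    simp [this, lfsrLoop]
  · rw [A_eq_map iv taps hm ht, B_eq_map iv taps hm ht]
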